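-- pv_equiv track=rewrite | github.com/ajcr/transfinite | ordinals.py | hi_lo_bisect_right
-- ===== SOURCE A (Python) =====
-- def hi_lo_bisect_right(lst, x):
--     # bisect list sorted high -> low. Based on the code in:
--     # https://hg.python.org/cpython/file/3.4/Lib/bisect.py
--     hi, lo = 0, len(lst)
--     while hi < lo:
--         mid = (lo+hi) // 2
--         if x > lst[mid]:
--             lo = mid
--         else:
--             hi = mid + 1
--     return hi
-- ===== SOURCE B (Python) =====
-- def hi_lo_bisect_right(lst, x):
--     # Recursive divide-and-conquer over index bounds [lo, hi); same
--     # comparison sequence as the iterative bisect, so exact on any list.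
--     def search(lo, hi):
--         if lo >= hi:
--             return hi
--         mid = (lo + hi) // 2
--         if x > lst[mid]:
--             return search(lo, mid)
--         return search(mid + 1, hi)
--     return search(0, len(lst))
-- ===== Notes on version B (the rewrite author's own statement) =====
-- stated objective: alternative
-- what changed: Replaces the iterative while-loop with mutable hi/lo pointers by a recursive divide-and-conquer helper search(lo, hi) that returns the upper bound at the empty interval; same comparison sequence, so exactly equivalent on every list including unsorted ones.
import Mathlib
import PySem

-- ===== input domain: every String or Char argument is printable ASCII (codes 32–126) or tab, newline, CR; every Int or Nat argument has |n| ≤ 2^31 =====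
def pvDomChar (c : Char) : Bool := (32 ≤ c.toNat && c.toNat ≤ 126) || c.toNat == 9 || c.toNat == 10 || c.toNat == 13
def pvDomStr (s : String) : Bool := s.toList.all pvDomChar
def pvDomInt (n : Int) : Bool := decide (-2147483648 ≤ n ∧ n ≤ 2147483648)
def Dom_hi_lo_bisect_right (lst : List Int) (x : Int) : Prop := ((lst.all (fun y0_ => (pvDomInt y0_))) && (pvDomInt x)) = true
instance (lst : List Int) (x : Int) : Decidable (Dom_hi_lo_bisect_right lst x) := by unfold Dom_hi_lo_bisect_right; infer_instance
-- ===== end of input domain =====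

-- B replaces A's iterative two-pointer while-loop by a recursive divide-and-conquer
-- helper over index bounds; same comparison sequence, proved exactly equivalent (alternative, not faster).

-- ===== PORT A =====
-- A's while-loop: state (hi, lo), hi = 0, lo = len(lst); mid is always in range,
-- so lst[mid] never raises; pyGetD's default 0 is unreachable.
def hiLoLoopA (lst : List Int) (x : Int) (hi lo : Int) : Int :=
  if _h : hi < lo then
    let mid := PySem.Int.floordiv (lo + hi) 2
    if x > PySem.List.pyGetD lst mid 0 then
      hiLoLoopA lst x hi mid
    else
      hiLoLoopA lst x (mid + 1) lo
  else hi
termination_by (lo - hi).toNat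
decreasing_by
  all_goals
    have hev : PySem.Int.floordiv (lo + hi) 2 = (lo + hi) / 2 :=
      PySem.Int.floordiv_eq_ediv_of_pos (by norm_num)
    omega

def hi_lo_bisect_right (lst : List Int) (x : Int) : Int :=
  hiLoLoopA lst x 0 (lst.length : Int)

-- ===== PORT B =====
-- B's recursive helper search(lo, hi): base case returns hi at the empty interval.
def searchB (lst : List Int) (x : Int) (lo hi : Nat) : Int :=
  if lo ≥ hi then (hi : Int)
  else
    let mid := (lo + hi) / 2
    if x > lst.getD mid 0 then
      searchB lst x lo mid
    else
      searchB lst x (mid + 1) hi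
termination_by hi - lo
decreasing_by all_goals omega

def hi_lo_bisect_right_alt (lst : List Int) (x : Int) : Int :=
  searchB lst x 0 lst.length

-- ===== PRECONDITION & SPEC =====
def Spec_hi_lo_bisect_right (lst : List Int) (x : Int) (out : Int) : Prop := out = hi_lo_bisect_right_alt lst x
instance (lst : List Int) (x : Int) (out : Int) : Decidable (Spec_hi_lo_bisect_right lst x out) := by unfold Spec_hi_lo_bisect_right; infer_instance

-- ===== CLAIM (what is proved, stated in full; the proofs are below) =====
def Claim_equal_hi_lo_bisect_right : Prop := ∀ (lst : List Int) (x : Int), Dom_hi_lo_bisect_right lst x → Spec_hi_lo_bisect_right lst x (hi_lo_bisect_right lst x)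

-- ===== LEMMAS AND PROOFS =====

-- A's loop state (hi, lo) corresponds to B's (lo, hi); with the invariant hi ≤ lo
-- both reach the same empty interval, where A returns the lower pointer and B the
-- upper bound, which then coincide.
theorem loop_eq_search (lst : List Int) (x : Int) :
    ∀ (n hi lo : Nat), lo - hi = n → hi ≤ lo →
      hiLoLoopA lst x (hi : Int) (lo : Int) = searchB lst x hi lo := by
  intro n
  induction n using Nat.strong_induction_on with
  | _ n ih =>
    intro hi lo hn hle
    by_cases h : hi < lo
    · have hlt : (hi : Int) < (lo : Int) := by exact_mod_cast h
      have hmb : hi ≤ (lo + hi) / 2 ∧ (lo + hi) / 2 < lo := by omega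
      have hmid : PySem.Int.floordiv ((lo : Int) + (hi : Int)) 2 = (((lo + hi) / 2 : Nat) : Int) := by
        exact_mod_cast PySem.Int.floordiv_natCast (lo + hi) 2
      have hget : PySem.List.pyGetD lst (((lo + hi) / 2 : Nat) : Int) 0 = lst.getD ((lo + hi) / 2) 0 := by
        simpa using PySem.List.pyGetD_natCast lst ((lo + hi) / 2) 0
      rw [hiLoLoopA, searchB, Nat.add_comm hi lo]
      simp only [dif_pos hlt, if_neg (Nat.not_le.mpr h), hmid, hget, ge_iff_le]
      by_cases hc : lst.getD ((lo + hi) / 2) 0 < x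
      · rw [if_pos hc, if_pos hc]
        exact ih ((lo + hi) / 2 - hi) (by omega) hi ((lo + hi) / 2) rfl (by omega)
      · rw [if_neg hc, if_neg hc]
        have := ih (lo - ((lo + hi) / 2 + 1)) (by omega) ((lo + hi) / 2 + 1) lo rfl (by omega)
        push_cast at this
        exact this
    · have heq : hi = lo := by omega
      rw [hiLoLoopA, searchB]
      simp [heq]

-- ===== VERDICT (by name: the statement is the Claim_ definition above) =====
theorem hi_lo_bisect_right_spec : Claim_equal_hi_lo_bisect_right := by
  intro lst x _
  unfold Spec_hi_lo_bisect_right hi_lo_bisect_right hi_lo_bisect_right_alt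
  have := loop_eq_search lst x lst.length 0 lst.length rfl (Nat.zero_le _)
  simpa using this
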